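-- pv_equiv track=rewrite | github.com/Morgandel/advent2020 | day8/day8.py | part1
-- ===== SOURCE A (Python) =====
-- def checkInst(pInst, pAccu, pI, pVisited):
--     if pI in pVisited:
--         return (pAccu, pI, pVisited, False)
--     pVisited[pI] = True
--     if(pInst[0] == "acc"):
--         pAccu += pInst[1]
--         pI += 1
--     elif(pInst[0] == "jmp"):
--         pI += pInst[1]
--     elif(pInst[0] == "nop"):
--         pI += 1
--     return (pAccu, pI, pVisited, True)
--
-- def part1(pContent):
--     visited = dict()
--     accu = 0
--     i = 0
--     loop = True
--     while loop:
--         accu, i, visited, loop = checkInst(pContent[i], accu, i, visited)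
--     return accu
-- ===== SOURCE B (Python) =====
-- def part1(pContent):
--     # Phase 1: follow the instruction pointer, recording the trace of executed
--     # indices until an index repeats.  Phase 2: the answer is the sum of the
--     # operands of the "acc" instructions along the trace.
--     seen = set()
--     trace = []
--     i = 0
--     while i not in seen:
--         seen.add(i)
--         trace.append(i)
--         op, v = pContent[i]
--         if op == "jmp":
--             i += v
--         elif op == "acc" or op == "nop":
--             i += 1
--     return sum(pContent[j][1] for j in trace if pContent[j][0] == "acc")
-- ===== Notes on version B (the rewrite author's own statement) =====
-- stated objective: alternative
-- what changed: B drops the checkInst helper and its accumulator/dict state threading: it first records only the trace of executed instruction indices (a set plus a list) until an index repeats, then computes the answer in a second phase as the sum of the 'acc' operands along that trace.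
import Mathlib
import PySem

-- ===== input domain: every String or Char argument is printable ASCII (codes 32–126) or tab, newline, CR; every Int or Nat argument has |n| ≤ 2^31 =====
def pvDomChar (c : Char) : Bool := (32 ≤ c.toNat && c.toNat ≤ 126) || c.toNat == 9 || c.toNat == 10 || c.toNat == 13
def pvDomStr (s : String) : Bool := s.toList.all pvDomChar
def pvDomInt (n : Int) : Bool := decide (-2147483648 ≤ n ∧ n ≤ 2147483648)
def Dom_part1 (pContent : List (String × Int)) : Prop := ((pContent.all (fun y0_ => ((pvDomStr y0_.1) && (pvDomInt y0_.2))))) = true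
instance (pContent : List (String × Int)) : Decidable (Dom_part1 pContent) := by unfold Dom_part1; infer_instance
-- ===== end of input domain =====

-- B replaces A's accumulator-and-dict threading through the checkInst helper by two phases:
-- record the trace of executed indices until one repeats, then sum the "acc" operands along the trace.

-- ===== PORT A =====
-- literal transliteration of checkInst
def checkInst (pInst : String × Int) (pAccu pI : Int) (pVisited : PySem.Dict Int Bool) :
    Int × Int × PySem.Dict Int Bool × Bool :=
  if pVisited.contains pI then (pAccu, pI, pVisited, false)
  else
    let pVisited := pVisited.insert pI true
    if pInst.1 = "acc" then (pAccu + pInst.2, pI + 1, pVisited, true)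
    else if pInst.1 = "jmp" then (pAccu, pI + pInst.2, pVisited, true)
    else if pInst.1 = "nop" then (pAccu, pI + 1, pVisited, true)
    else (pAccu, pI, pVisited, true)

-- A's while loop, with fuel 2*length+1: inside Pre_part1 the loop visits pairwise-distinct
-- indices, all in [-length, length), so it terminates within that many iterations.
-- pyGet? = none is Python's IndexError on pContent[i]; those inputs are excluded by Pre_part1.
def part1Loop (pContent : List (String × Int)) : Nat → Int → Int → PySem.Dict Int Bool → Int
  | 0, accu, _, _ => accu
  | fuel + 1, accu, i, visited =>
    match PySem.List.pyGet? pContent i with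
    | none => accu
    | some inst =>
      match checkInst inst accu i visited with
      | (accu', i', visited', loop) =>
        if loop then part1Loop pContent fuel accu' i' visited' else accu'

def part1 (pContent : List (String × Int)) : Int :=
  part1Loop pContent (2 * pContent.length + 1) 0 0 PySem.Dict.empty

-- ===== PORT B =====
-- sum(pContent[j][1] for j in trace if pContent[j][0] == "acc"); pyGet? is total (none cannot occur for traced j)
def accSum (pContent : List (String × Int)) (trace : List Int) : Int :=
  trace.foldl (fun s j =>
    match PySem.List.pyGet? pContent j with
    | some (op, v) => if op = "acc" then s + v else s
    | none => s) 0

-- B's while loop: collect the trace of executed indices until one repeats (same fuel bound as A's port)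
def traceLoop (pContent : List (String × Int)) : Nat → List Int → PySem.Set Int → Int → List Int
  | 0, trace, _, _ => trace
  | fuel + 1, trace, seen, i =>
    if PySem.Set.contains seen i then trace
    else
      let seen := PySem.Set.add seen i
      let trace := trace ++ [i]
      match PySem.List.pyGet? pContent i with
      | none => trace
      | some (op, v) =>
        traceLoop pContent fuel trace seen
          (if op = "jmp" then i + v else if op = "acc" ∨ op = "nop" then i + 1 else i)

def part1_alt (pContent : List (String × Int)) : Int :=
  accSum pContent (traceLoop pContent (2 * pContent.length + 1) [] PySem.Set.empty 0)

-- ===== PRECONDITION & SPEC =====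
-- Used by Pre_part1 only: the control-flow successor map of the program's jump graph
-- (out-of-range indices are fixed points; the accumulator plays no role in control flow).
def nextIp (pContent : List (String × Int)) (i : Int) : Int :=
  match PySem.List.pyGet? pContent i with
  | none => i
  | some (op, v) => if op = "jmp" then i + v else if op = "acc" ∨ op = "nop" then i + 1 else i

-- Pre_ excludes exactly the inputs on which A (and B alike) raises IndexError: those whose
-- control-flow orbit from index 0 leaves the valid index range [-len, len).  Every input on which
-- A returns a value is admitted: a non-escaping orbit repeats an index within 2*len+1 steps
-- (pigeonhole over the 2*len valid indices) and then cycles in range forever, so checking the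
-- first 2*len+2 orbit points is exact.
def Pre_part1 (pContent : List (String × Int)) : Prop :=
  ∀ k ∈ Finset.range (2 * pContent.length + 2),
    PySem.List.pyGet? pContent ((nextIp pContent)^[k] 0) ≠ none
instance (pContent : List (String × Int)) : Decidable (Pre_part1 pContent) := by
  unfold Pre_part1; infer_instance

def pvWitness_part1 : (List (String × Int)) := [("jmp", 0)]

def Spec_part1 (pContent : List (String × Int)) (out : Int) : Prop := out = part1_alt pContent
instance (pContent : List (String × Int)) (out : Int) : Decidable (Spec_part1 pContent out) := by
  unfold Spec_part1; infer_instance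

-- ===== CLAIM (what is proved, stated in full; the proofs are below) =====
def Claim_equal_part1 : Prop := ∀ (pContent : List (String × Int)), Dom_part1 pContent → Pre_part1 pContent → Spec_part1 pContent (part1 pContent)

-- ===== LEMMAS AND PROOFS =====

lemma accSum_append (c : List (String × Int)) (t : List Int) (i : Int) :
    accSum c (t ++ [i]) =
      match PySem.List.pyGet? c i with
      | some (op, v) => if op = "acc" then accSum c t + v else accSum c t
      | none => accSum c t := by
  simp only [accSum, List.foldl_append, List.foldl_cons, List.foldl_nil]

-- the two fuel-indexed loops agree whenever accu is the acc-sum of the trace and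
-- visited's keys are exactly the seen set
lemma loop_eq (c : List (String × Int)) :
    ∀ (fuel : Nat) (accu i : Int) (visited : PySem.Dict Int Bool)
      (trace : List Int) (seen : PySem.Set Int),
      (∀ j : Int, visited.contains j = true ↔ PySem.Set.contains seen j = true) →
      accu = accSum c trace →
      part1Loop c fuel accu i visited = accSum c (traceLoop c fuel trace seen i) := by
  intro fuel
  induction fuel with
  | zero => intro accu i visited trace seen _ hacc; simpa [part1Loop, traceLoop] using hacc
  | succ n ih =>
    intro accu i visited trace seen hinv hacc
    simp only [part1Loop, traceLoop]
    by_cases hmem : i ∈ seen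
    · have hcon : PySem.Set.contains seen i = true := (PySem.Set.contains_iff seen i).mpr hmem
      have hvis : visited.contains i = true := (hinv i).mpr hcon
      cases hget : PySem.List.pyGet? c i with
      | none => simp [hmem, hacc]
      | some inst => simp [hmem, checkInst, hvis, hacc]
    · have hcon : PySem.Set.contains seen i = false :=
        Bool.eq_false_iff.mpr (fun h => hmem ((PySem.Set.contains_iff seen i).mp h))
      have hvis : visited.contains i = false :=
        Bool.eq_false_iff.mpr (fun h => hmem ((PySem.Set.contains_iff seen i).mp ((hinv i).mp h)))
      cases hget : PySem.List.pyGet? c i with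
      | none =>
        have hs : accSum c (trace ++ [i]) = accu := by rw [accSum_append, hget, hacc]
        simp [hmem, hacc, hs]
      | some inst =>
        cases inst with
        | mk op v =>
          have hinv' : ∀ j : Int, (visited.insert i true).contains j = true ↔
              PySem.Set.contains (PySem.Set.add seen i) j = true := by
            intro j
            rw [PySem.Dict.contains_insert]
            simp only [Bool.or_eq_true, beq_iff_eq]
            rw [PySem.Set.contains_iff, PySem.Set.mem_add, ← PySem.Set.contains_iff, hinv j]
            tauto
          have hsum : accSum c (trace ++ [i]) =
              if op = "acc" then accu + v else accu := by
            rw [accSum_append, hget, hacc]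
          simp only [checkInst, hvis, Bool.false_eq_true, if_false, hcon]
          by_cases hop1 : op = "acc"
          · have := ih (accu + v) (i + 1) (visited.insert i true) (trace ++ [i])
              (PySem.Set.add seen i) hinv' (by rw [hsum]; simp [hop1])
            simpa [hop1] using this
          · by_cases hop2 : op = "jmp"
            · have := ih accu (i + v) (visited.insert i true) (trace ++ [i])
                (PySem.Set.add seen i) hinv' (by rw [hsum]; simp [hop1])
              simpa [hop1, hop2] using this
            · by_cases hop3 : op = "nop"
              · have := ih accu (i + 1) (visited.insert i true) (trace ++ [i])
                  (PySem.Set.add seen i) hinv' (by rw [hsum]; simp [hop1])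
                simpa [hop1, hop2, hop3] using this
              · have := ih accu i (visited.insert i true) (trace ++ [i])
                  (PySem.Set.add seen i) hinv' (by rw [hsum]; simp [hop1])
                simpa [hop1, hop2, hop3] using this

-- ===== VERDICT (by name: the statement is the Claim_ definition above) =====
theorem part1_spec : Claim_equal_part1 := by
  intro pContent _ _
  unfold Spec_part1 part1 part1_alt
  exact loop_eq pContent (2 * pContent.length + 1) 0 0 PySem.Dict.empty [] PySem.Set.empty
    (by intro j; simp [PySem.Dict.contains_empty, PySem.Set.contains, PySem.Set.empty])
    (by simp [accSum])
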